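-- pv_equiv track=rewrite | github.com/KaiHe-CatOwner/Genealogical-Knowledge-Graph | Genealogical-Knowledge-Graph/data/code/_4_0_preprocess_BIES.py | generated_BIOES
-- ===== SOURCE A (Python) =====
-- def generated_BIOES(tagged_index_list, entity_type, temp_list):
--     if len(tagged_index_list) == 0:
--         temp_list = temp_list
--     if len(tagged_index_list) == 1:
--         temp_list[tagged_index_list[0]] = entity_type + "_S"
--     if len(tagged_index_list) == 2:
--         temp_list[tagged_index_list[0]] = entity_type + "_B"
--         temp_list[tagged_index_list[1]] = entity_type + "_E"
--     if len(tagged_index_list) > 2: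
--         temp_list[tagged_index_list[0]] = entity_type + "_B"
--         for i in tagged_index_list[1:-1]:
--             temp_list[i] = entity_type + "_I"
--         temp_list[tagged_index_list[-1]] = entity_type + "_E"
--     return temp_list
-- ===== SOURCE B (Python) =====
-- def generated_BIOES(tagged_index_list, entity_type, temp_list):
--     n = len(tagged_index_list)
--     for pos, idx in enumerate(tagged_index_list):
--         if n == 1:
--             tag = "_S"
--         elif pos == 0:
--             tag = "_B"
--         elif pos == n - 1:
--             tag = "_E"
--         else:
--             tag = "_I"
--         temp_list[idx] = entity_type + tag
--     return temp_list
-- ===== Notes on version B (the rewrite author's own statement) =====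
-- stated objective: simpler
-- what changed: Replaced A's four length-case branches (with a separate slice sub-loop for the interior) by one enumerate pass that picks each position's tag by its role (only/first/last/interior) and writes it, preserving left-to-right write order.
import Mathlib
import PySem

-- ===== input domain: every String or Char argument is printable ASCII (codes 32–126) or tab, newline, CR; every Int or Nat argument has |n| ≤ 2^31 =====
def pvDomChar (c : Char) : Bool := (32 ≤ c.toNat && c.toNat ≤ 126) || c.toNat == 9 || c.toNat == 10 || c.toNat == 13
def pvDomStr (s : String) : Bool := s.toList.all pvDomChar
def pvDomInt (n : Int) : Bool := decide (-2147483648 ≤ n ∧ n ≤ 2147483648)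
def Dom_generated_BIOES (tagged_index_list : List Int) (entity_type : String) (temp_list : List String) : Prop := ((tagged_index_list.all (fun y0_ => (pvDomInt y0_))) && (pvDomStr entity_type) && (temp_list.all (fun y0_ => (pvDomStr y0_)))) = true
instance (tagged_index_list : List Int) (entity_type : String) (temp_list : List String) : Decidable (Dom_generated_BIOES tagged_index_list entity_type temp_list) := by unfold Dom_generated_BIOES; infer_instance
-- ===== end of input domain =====

-- B replaces A's four length-case branches and interior sub-loop by one enumerate pass
-- assigning each position its tag by role (simpler; return value only: both mutate temp_list in Python).

-- ===== PORT A =====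
def generated_BIOES (tagged_index_list : List Int) (entity_type : String) (temp_list : List String) : List String :=
  -- 'if len == 0: temp_list = temp_list' is a no-op, kept as the identity branch
  let t0 := temp_list
  let t1 := if tagged_index_list.length = 1 then
      PySem.List.pySetD t0 (PySem.List.pyGetD tagged_index_list 0 0) (entity_type ++ "_S")
    else t0
  let t2 := if tagged_index_list.length = 2 then
      PySem.List.pySetD
        (PySem.List.pySetD t1 (PySem.List.pyGetD tagged_index_list 0 0) (entity_type ++ "_B"))
        (PySem.List.pyGetD tagged_index_list 1 0) (entity_type ++ "_E")
    else t1
  let t3 := if tagged_index_list.length > 2 then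
      let u := PySem.List.pySetD t2 (PySem.List.pyGetD tagged_index_list 0 0) (entity_type ++ "_B")
      let u := (PySem.List.slice tagged_index_list (some 1) (some (-1))).foldl
                 (fun acc i => PySem.List.pySetD acc i (entity_type ++ "_I")) u
      PySem.List.pySetD u (PySem.List.pyGetD tagged_index_list (-1) 0) (entity_type ++ "_E")
    else t2
  t3

-- ===== PORT B =====
def generated_BIOES_alt (tagged_index_list : List Int) (entity_type : String) (temp_list : List String) : List String :=
  let n : Int := tagged_index_list.length
  (PySem.List.enumerate tagged_index_list 0).foldl
    (fun acc p =>
      PySem.List.pySetD acc p.2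
        (entity_type ++ (if n = 1 then "_S"
                         else if p.1 = 0 then "_B"
                         else if p.1 = n - 1 then "_E"
                         else "_I"))) temp_list

-- ===== PRECONDITION & SPEC =====
-- Pre_ excludes exactly the inputs where Python A raises IndexError: an index outside temp_list's range.
def Pre_generated_BIOES (tagged_index_list : List Int) (entity_type : String) (temp_list : List String) : Prop :=
  ∀ i ∈ tagged_index_list, PySem.Raise.InRange temp_list.length i
instance (tagged_index_list : List Int) (entity_type : String) (temp_list : List String) : Decidable (Pre_generated_BIOES tagged_index_list entity_type temp_list) := by unfold Pre_generated_BIOES; infer_instance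

def pvWitness_generated_BIOES : List Int × String × List String := ([0, 1, 2], "PER", ["o", "o", "o", "o"])

def Spec_generated_BIOES (tagged_index_list : List Int) (entity_type : String) (temp_list : List String) (out : List String) : Prop := out = generated_BIOES_alt tagged_index_list entity_type temp_list
instance (tagged_index_list : List Int) (entity_type : String) (temp_list : List String) (out : List String) : Decidable (Spec_generated_BIOES tagged_index_list entity_type temp_list out) := by unfold Spec_generated_BIOES; infer_instance

-- ===== CLAIM (what is proved, stated in full; the proofs are below) =====
def Claim_equal_generated_BIOES : Prop := ∀ (tagged_index_list : List Int) (entity_type : String) (temp_list : List String), Dom_generated_BIOES tagged_index_list entity_type temp_list → Pre_generated_BIOES tagged_index_list entity_type temp_list → Spec_generated_BIOES tagged_index_list entity_type temp_list (generated_BIOES tagged_index_list entity_type temp_list)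

-- ===== LEMMAS AND PROOFS =====

-- B's fold over the enumerated tail (positions ≥ 1) writes _I on every middle element in order
-- and _E on the final one — exactly A's interior loop followed by the last write.
lemma foldB_mid (et : String) (y : Int) (n : Int) (m : List Int) (k : Int) (acc : List String)
    (hk : 1 ≤ k) (hn : k + m.length + 1 = n) :
    (PySem.List.enumerate (m ++ [y]) k).foldl
      (fun acc p =>
        PySem.List.pySetD acc p.2
          (et ++ (if p.1 = 0 then "_B" else if p.1 = n - 1 then "_E" else "_I"))) acc
    = PySem.List.pySetD
        (m.foldl (fun a i => PySem.List.pySetD a i (et ++ "_I")) acc) y (et ++ "_E") := by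
  induction m generalizing k acc with
  | nil =>
    simp only [List.length_nil] at hn
    simp only [List.nil_append, PySem.List.enumerate_cons, PySem.List.enumerate_nil,
      List.foldl_cons, List.foldl_nil]
    have h2 : ¬ (k = 0) := by omega
    have h3 : k = n - 1 := by omega
    have h4 : ¬ (n - 1 = 0) := by omega
    simp [h3, h4]
  | cons h t ih =>
    simp only [List.length_cons] at hn
    simp only [List.cons_append, PySem.List.enumerate_cons, List.foldl_cons]
    have h2 : ¬ (k = 0) := by omega
    have h3 : ¬ (k = n - 1) := by push_cast at hn; omega
    rw [ih (k + 1) _ (by omega) (by push_cast at hn ⊢; omega)]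
    simp [h2, h3]

-- l[1:-1] of a :: m ++ [y] is m
lemma slice_mid (a y : Int) (m : List Int) :
    PySem.List.slice (a :: (m ++ [y])) (some 1) (some (-1)) = m := by
  simp [PySem.List.slice]

lemma pyGetD_last (a y : Int) (m : List Int) :
    PySem.List.pyGetD (a :: (m ++ [y])) (-1) 0 = y := by
  rw [show a :: (m ++ [y]) = (a :: m) ++ [y] from by simp,
    PySem.List.pyGetD_neg_one_append_singleton]

-- the ≥ 3 case, with the tail written as middle ++ [last]
lemma main3 (a y : Int) (m : List Int) (et : String) (tl : List String) (hm1 : 1 ≤ m.length) :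
    generated_BIOES (a :: (m ++ [y])) et tl = generated_BIOES_alt (a :: (m ++ [y])) et tl := by
  have hL : (a :: (m ++ [y])).length = m.length + 2 := by simp
  have e1 : ¬((a :: (m ++ [y])).length = 1) := by omega
  have e2 : ¬((a :: (m ++ [y])).length = 2) := by omega
  have e3 : (a :: (m ++ [y])).length > 2 := by omega
  have hn1 : ¬(((a :: (m ++ [y])).length : Int) = 1) := by
    rw [hL]; push_cast; omega
  unfold generated_BIOES generated_BIOES_alt
  simp only [if_neg e1, if_neg e2, if_pos e3, PySem.List.enumerate_cons, List.foldl_cons,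
    if_neg hn1, if_true, zero_add]
  rw [foldB_mid et y ((a :: (m ++ [y])).length : Int) m 1 _ (by omega)
    (by rw [hL]; push_cast; omega)]
  rw [slice_mid a y m, pyGetD_last, PySem.List.pyGetD_zero_cons]

-- ===== VERDICT (by name: the statement is the Claim_ definition above) =====
theorem generated_BIOES_spec : Claim_equal_generated_BIOES := by
  intro l et tl _ _
  unfold Spec_generated_BIOES
  match l with
  | [] => rfl
  | [a] =>
    simp [generated_BIOES, generated_BIOES_alt, PySem.List.enumerate_cons]
  | [a, b] =>
    simp [generated_BIOES, generated_BIOES_alt, PySem.List.enumerate_cons, PySem.List.pyGetD]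
  | a :: b :: c :: rest =>
    obtain ⟨m, y, hm⟩ : ∃ m y, b :: c :: rest = m ++ [y] := by
      refine ⟨(b :: c :: rest).dropLast, (b :: c :: rest).getLast (by simp), ?_⟩
      exact (List.dropLast_append_getLast (by simp)).symm
    have hlen : m.length = rest.length + 1 := by
      have := congrArg List.length hm; simp at this; omega
    rw [hm]
    exact main3 a y m et tl (by omega)
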